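-- pv_equiv track=rewrite | github.com/ArchonMegalon/fleet | admin/public_progress.py | _phase_label
-- ===== SOURCE A (Python) =====
-- from typing import Any, Callable, Dict, List, Optional, Sequence
--
-- def _phase_label(progress_percent: int, labels: Sequence[Dict[str, Any]]) -> str:
--     chosen = "In progress"
--     for row in labels or []:
--         try:
--             threshold = int(row.get("min_progress_percent") or 0)
--         except Exception:
--             threshold = 0
--         if progress_percent >= threshold:
--             chosen = str(row.get("label") or chosen).strip() or chosen
--     return chosen
-- ===== SOURCE B (Python) =====
-- def _phase_label(progress_percent, labels):
--     # Scan from the end: the last qualifying row with a non-empty stripped label wins,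
--     # so the first such row in reverse order is the answer.
--     for row in reversed(labels or []):
--         try:
--             threshold = int(row.get("min_progress_percent") or 0)
--         except Exception:
--             threshold = 0
--         if progress_percent >= threshold:
--             lbl = row.get("label")
--             if lbl:
--                 candidate = str(lbl).strip()
--                 if candidate:
--                     return candidate
--     return "In progress"
-- ===== Notes on version B (the rewrite author's own statement) =====
-- stated objective: alternative
-- what changed: B scans the rows in reverse and returns the first qualifying row whose stripped label is non-empty (early exit), instead of A's forward fold that keeps overwriting an accumulator so the last match wins.
import Mathlib
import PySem

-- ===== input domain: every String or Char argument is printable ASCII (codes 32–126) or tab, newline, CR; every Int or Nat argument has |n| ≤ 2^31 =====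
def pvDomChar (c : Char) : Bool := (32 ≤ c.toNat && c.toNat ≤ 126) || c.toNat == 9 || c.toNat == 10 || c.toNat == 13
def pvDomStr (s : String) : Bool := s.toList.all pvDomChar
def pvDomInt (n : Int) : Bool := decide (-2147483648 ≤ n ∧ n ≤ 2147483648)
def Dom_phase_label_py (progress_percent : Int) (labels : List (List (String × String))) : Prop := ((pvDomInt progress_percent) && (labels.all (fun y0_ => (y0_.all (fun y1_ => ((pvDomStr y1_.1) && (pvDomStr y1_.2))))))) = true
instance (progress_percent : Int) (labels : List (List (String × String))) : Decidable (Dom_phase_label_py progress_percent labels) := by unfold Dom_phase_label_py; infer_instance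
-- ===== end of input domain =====

-- B replaces A's forward fold (last match overwrites an accumulator) by a reverse scan with early return; alternative decomposition, same cost.

-- ===== PORT A =====
-- row.get(k): first match in the association list (dict convention)
def pvRowGet (row : List (String × String)) (k : String) : Option String :=
  (row.find? (fun p => p.1 == k)).map (·.2)

-- try: threshold = int(row.get("min_progress_percent") or 0) except: threshold = 0
def pvThreshold (row : List (String × String)) : Int :=
  match pvRowGet row "min_progress_percent" with
  | none => 0
  | some s => if s = "" then 0 else (PySem.Int.ofStr? s).getD 0

def phase_label_py (progress_percent : Int) (labels : List (List (String × String))) : String :=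
  labels.foldl (fun chosen row =>
    let threshold := pvThreshold row
    if progress_percent ≥ threshold then
      -- chosen = str(row.get("label") or chosen).strip() or chosen
      let v : String := match pvRowGet row "label" with
        | some s => if s ≠ "" then s else chosen
        | none => chosen
      let t := PySem.Str.strip v
      if t ≠ "" then t else chosen
    else chosen) "In progress"

-- ===== PORT B =====
def phase_label_py_alt_go (progress_percent : Int) : List (List (String × String)) → String
  | [] => "In progress"
  | row :: rest =>
    let threshold := pvThreshold row
    if progress_percent ≥ threshold then
      match pvRowGet row "label" with
      | some lbl =>
        if lbl ≠ "" then
          let candidate := PySem.Str.strip lbl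
          if candidate ≠ "" then candidate else phase_label_py_alt_go progress_percent rest
        else phase_label_py_alt_go progress_percent rest
      | none => phase_label_py_alt_go progress_percent rest
    else phase_label_py_alt_go progress_percent rest

def phase_label_py_alt (progress_percent : Int) (labels : List (List (String × String))) : String :=
  phase_label_py_alt_go progress_percent labels.reverse

-- ===== PRECONDITION & SPEC =====
def Spec_phase_label_py (progress_percent : Int) (labels : List (List (String × String))) (out : String) : Prop := out = phase_label_py_alt progress_percent labels
instance (progress_percent : Int) (labels : List (List (String × String))) (out : String) : Decidable (Spec_phase_label_py progress_percent labels out) := by unfold Spec_phase_label_py; infer_instance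

-- ===== CLAIM (what is proved, stated in full; the proofs are below) =====
def Claim_equal_phase_label_py : Prop := ∀ (progress_percent : Int) (labels : List (List (String × String))), Dom_phase_label_py progress_percent labels → Spec_phase_label_py progress_percent labels (phase_label_py progress_percent labels)

-- ===== LEMMAS AND PROOFS =====

-- A's loop body as a function
def pvStepA (progress_percent : Int) (chosen : String) (row : List (String × String)) : String :=
  let threshold := pvThreshold row
  if progress_percent ≥ threshold then
    let v : String := match pvRowGet row "label" with
      | some s => if s ≠ "" then s else chosen
      | none => chosen
    let t := PySem.Str.strip v
    if t ≠ "" then t else chosen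
  else chosen

-- B's scan with a parameterised default
def pvGoD (progress_percent : Int) (d : String) : List (List (String × String)) → String
  | [] => d
  | row :: rest =>
    if progress_percent ≥ pvThreshold row then
      match pvRowGet row "label" with
      | some lbl =>
        if lbl ≠ "" then
          if PySem.Str.strip lbl ≠ "" then PySem.Str.strip lbl else pvGoD progress_percent d rest
        else pvGoD progress_percent d rest
      | none => pvGoD progress_percent d rest
    else pvGoD progress_percent d rest

theorem pvGo_eq_goD (p : Int) (xs : List (List (String × String))) :
    phase_label_py_alt_go p xs = pvGoD p "In progress" xs := by
  induction xs with
  | nil => rfl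
  | cons r rs ih =>
    simp only [phase_label_py_alt_go, pvGoD]
    by_cases h : p ≥ pvThreshold r
    · cases hlab : pvRowGet r "label" with
      | none => simp [h, hlab, ih]
      | some s =>
        by_cases hs : s = ""
        · simp [h, hlab, hs, ih]
        · by_cases hss : PySem.Str.strip s = ""
          · simp [h, hlab, hs, hss, ih]
          · simp [h, hlab, hs, hss]
    · simp [h, ih]

theorem pvDropWhile_idem {α : Type} (p : α → Bool) (l : List α) :
    List.dropWhile p (List.dropWhile p l) = List.dropWhile p l := by
  induction l with
  | nil => rfl
  | cons a l ih =>
    by_cases h : p a = true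
    · simp [List.dropWhile_cons, h, ih]
    · simp [List.dropWhile_cons, h]

theorem pvDropWhile_append_self {α : Type} (p : α → Bool) (a t l : List α)
    (hl : List.dropWhile p l = l) (heq : l = a ++ t) :
    List.dropWhile p a = a := by
  cases a with
  | nil => rfl
  | cons x a' =>
    subst heq
    simp only [List.cons_append] at hl
    have hx : p x = false := by
      cases hp : p x
      · rfl
      · rw [List.dropWhile_cons, if_pos hp] at hl
        have hle := List.length_dropWhile_le p (a' ++ t)
        rw [hl] at hle
        simp at hle
    rw [List.dropWhile_cons, if_neg (by simp [hx])]

theorem pvCharsStrip_idem (cs : List Char) :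
    PySem.Chars.strip (PySem.Chars.strip cs) = PySem.Chars.strip cs := by
  unfold PySem.Chars.strip PySem.Chars.lstrip PySem.Chars.rstrip
  set p := PySem.Chars.isspace
  set x := List.dropWhile p cs with hx
  -- strip cs = (dropWhile p x.reverse).reverse, a prefix of x
  have hxfix : List.dropWhile p x = x := pvDropWhile_idem p cs
  have hsuffix : ∃ t, x.reverse = t ++ List.dropWhile p x.reverse :=
    ⟨List.takeWhile p x.reverse, (List.takeWhile_append_dropWhile).symm⟩
  have hprefix : ∃ t, x = (List.dropWhile p x.reverse).reverse ++ t := by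
    obtain ⟨t, ht⟩ := hsuffix
    refine ⟨t.reverse, ?_⟩
    have := congrArg List.reverse ht
    simpa using this
  obtain ⟨t, ht⟩ := hprefix
  have h1 : List.dropWhile p (List.dropWhile p x.reverse).reverse
      = (List.dropWhile p x.reverse).reverse :=
    pvDropWhile_append_self p _ t x hxfix ht
  rw [h1, List.reverse_reverse, pvDropWhile_idem]

theorem pvStrStrip_idem (s : String) :
    PySem.Str.strip (PySem.Str.strip s) = PySem.Str.strip s := by
  simp [PySem.Str.strip, pvCharsStrip_idem]

-- the loop-body/scan agreement at one row, under the accumulator invariant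
theorem pvStepA_char (p : Int) (d : String) (r : List (String × String))
    (hfix : PySem.Str.strip d = d) (hne : d ≠ "") :
    pvStepA p d r =
      (if p ≥ pvThreshold r then
        (match pvRowGet r "label" with
        | some lbl =>
          if lbl ≠ "" then
            if PySem.Str.strip lbl ≠ "" then PySem.Str.strip lbl else d
          else d
        | none => d)
      else d) := by
  by_cases h : p ≥ pvThreshold r
  · cases hlab : pvRowGet r "label" with
    | none => simp [pvStepA, hlab, hfix, hne, h]
    | some s =>
      by_cases hs : s = ""
      · simp [pvStepA, hlab, hs, hfix, hne, h]
      · by_cases hss : PySem.Str.strip s = ""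
        · simp [pvStepA, hlab, hs, hss, hfix, hne, h]
        · simp [pvStepA, hlab, hs, hss, h]
  · simp [pvStepA, h]

theorem pvStepA_invariant (p : Int) (d : String) (r : List (String × String))
    (hfix : PySem.Str.strip d = d) (hne : d ≠ "") :
    PySem.Str.strip (pvStepA p d r) = pvStepA p d r ∧ pvStepA p d r ≠ "" := by
  rw [pvStepA_char p d r hfix hne]
  split_ifs with h
  · cases hlab : pvRowGet r "label" with
    | none => simp only [hlab]; exact ⟨hfix, hne⟩
    | some s =>
      by_cases hs : s = ""
      · simp only [hlab, hs]; simp; exact ⟨hfix, hne⟩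
      · by_cases hss : PySem.Str.strip s = ""
        · simp only [hlab]; simp [hs, hss]; exact ⟨hfix, hne⟩
        · simp only [hlab]; simp [hs, hss]; exact pvStrStrip_idem s
  · exact ⟨hfix, hne⟩

theorem pvGoD_append_one (p : Int) (d : String) (r : List (String × String))
    (xs : List (List (String × String)))
    (hfix : PySem.Str.strip d = d) (hne : d ≠ "") :
    pvGoD p d (xs ++ [r]) = pvGoD p (pvStepA p d r) xs := by
  induction xs with
  | nil =>
    simp only [List.nil_append, pvGoD]
    rw [pvStepA_char p d r hfix hne]
  | cons y ys ih =>
    simp only [List.cons_append, pvGoD]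
    by_cases h : p ≥ pvThreshold y
    · cases hlab : pvRowGet y "label" with
      | none => simp [h, hlab, ih]
      | some s =>
        by_cases hs : s = ""
        · simp [h, hlab, hs, ih]
        · by_cases hss : PySem.Str.strip s = ""
          · simp [h, hlab, hs, hss, ih]
          · simp [h, hlab, hs, hss]
    · simp [h, ih]

theorem pvFoldl_eq_goD (p : Int) (l : List (List (String × String))) (d : String)
    (hfix : PySem.Str.strip d = d) (hne : d ≠ "") :
    l.foldl (pvStepA p) d = pvGoD p d l.reverse := by
  induction l generalizing d with
  | nil => rfl
  | cons r rs ih =>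
    have hinv := pvStepA_invariant p d r hfix hne
    rw [List.foldl_cons, ih (pvStepA p d r) hinv.1 hinv.2,
      List.reverse_cons, pvGoD_append_one p d r rs.reverse hfix hne]

-- ===== VERDICT (by name: the statement is the Claim_ definition above) =====
theorem phase_label_py_spec : Claim_equal_phase_label_py := by
  intro p labels _
  show phase_label_py p labels = phase_label_py_alt p labels
  have hA : phase_label_py p labels = labels.foldl (pvStepA p) "In progress" := rfl
  rw [hA, pvFoldl_eq_goD p labels "In progress" (by decide) (by decide),
    phase_label_py_alt, pvGo_eq_goD]
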